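-- pv_equiv track=rewrite | github.com/archPotato/Codewars | 07_RightIntheCenter.py | is_in_middle
-- ===== SOURCE A (Python) =====
-- def is_in_middle(sequence):
--     i = 0
--     for a,b,c in zip(sequence, sequence[1:], sequence[2:]):
--         i+=1
--         if a+b+c == "abc":
--             if abs((i-1)-(len(sequence)-i-2))<=1:
--                 return True
--     return False
-- ===== SOURCE B (Python) =====
-- def is_in_middle(sequence):
--     n = len(sequence)
--     return any(
--         sequence[i - 1] + sequence[i] + sequence[i + 1] == "abc"
--         for i in (n // 2 - 1, n // 2)
--         if 1 <= i <= n - 2 and n - 2 <= 2 * i <= n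
--     )
-- ===== Notes on version B (the rewrite author's own statement) =====
-- stated objective: faster
-- what changed: Replaces the full scan over all consecutive triples with a constant-size check of the at most two center indices that can satisfy A's distance condition, derived in closed form from |2i-n+1|<=1.
import Mathlib
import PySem

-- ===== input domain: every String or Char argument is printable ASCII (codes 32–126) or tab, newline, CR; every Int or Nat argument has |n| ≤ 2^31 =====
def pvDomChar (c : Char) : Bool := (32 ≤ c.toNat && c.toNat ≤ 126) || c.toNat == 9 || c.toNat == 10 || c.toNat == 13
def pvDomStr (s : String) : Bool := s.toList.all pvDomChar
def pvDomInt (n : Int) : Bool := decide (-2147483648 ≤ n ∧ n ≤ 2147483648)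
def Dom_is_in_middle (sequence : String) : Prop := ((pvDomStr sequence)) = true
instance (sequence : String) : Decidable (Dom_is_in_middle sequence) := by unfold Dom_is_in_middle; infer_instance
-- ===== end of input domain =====

-- B replaces A's linear scan of all triples by a constant-size check of the
-- at most two center positions that can satisfy A's distance condition (objective: faster).

-- ===== PORT A =====
-- the for-loop over zip(sequence, sequence[1:], sequence[2:]) with counter i
def pvALoop (n : Int) : List (Char × Char × Char) → Int → Bool
  | [], _ => false
  | (a, b, c) :: rest, i =>
    let i' := i + 1
    if String.mk [a, b, c] = "abc" then
      if ((i' - 1) - (n - i' - 2)).natAbs ≤ 1 then true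
      else pvALoop n rest i'
    else pvALoop n rest i'

def is_in_middle (sequence : String) : Bool :=
  let l := sequence.toList
  let n : Int := l.length
  -- zip(sequence, sequence[1:], sequence[2:]); the slices [1:]/[2:] are exactly drop 1/drop 2
  pvALoop n (l.zip ((l.drop 1).zip (l.drop 2))) 0

-- ===== PORT B =====
-- sequence[i-1] + sequence[i] + sequence[i+1] == "abc" (indices are in range when evaluated)
def pvTripleAbc (l : List Char) (i : Int) : Bool :=
  match PySem.List.pyGet? l (i - 1), PySem.List.pyGet? l i, PySem.List.pyGet? l (i + 1) with
  | some a, some b, some c => String.mk [a, b, c] = "abc"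
  | _, _, _ => false

def is_in_middle_alt (sequence : String) : Bool :=
  let l := sequence.toList
  let n : Int := l.length
  [PySem.Int.floordiv n 2 - 1, PySem.Int.floordiv n 2].any fun i =>
    decide (1 ≤ i) && decide (i ≤ n - 2) && decide (n - 2 ≤ 2 * i) &&
      decide (2 * i ≤ n) && pvTripleAbc l i

-- ===== PRECONDITION & SPEC =====
def Spec_is_in_middle (sequence : String) (out : Bool) : Prop := out = is_in_middle_alt sequence
instance (sequence : String) (out : Bool) : Decidable (Spec_is_in_middle sequence out) := by unfold Spec_is_in_middle; infer_instance

-- ===== CLAIM (what is proved, stated in full; the proofs are below) =====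
def Claim_equal_is_in_middle : Prop := ∀ (sequence : String), Dom_is_in_middle sequence → Spec_is_in_middle sequence (is_in_middle sequence)

-- ===== LEMMAS AND PROOFS =====

lemma pvALoop_iff (n : Int) (ts : List (Char × Char × Char)) (i : Int) :
    pvALoop n ts i = true ↔
      ∃ j : Nat, ∃ a b c : Char, ts[j]? = some (a, b, c) ∧ String.mk [a, b, c] = "abc" ∧
        n - 2 ≤ 2 * (i + j + 1) ∧ 2 * (i + j + 1) ≤ n := by
  induction ts generalizing i with
  | nil => simp [pvALoop]
  | cons t rest ih =>
    obtain ⟨a, b, c⟩ := t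
    rw [pvALoop]
    split_ifs with habc hmid
    · constructor
      · intro _
        exact ⟨0, a, b, c, by simp, habc, by push_cast; omega⟩
      · intro _; rfl
    · rw [ih]
      constructor
      · rintro ⟨j, a', b', c', hget, h1, h2⟩
        exact ⟨j + 1, a', b', c', by simpa using hget, h1, by push_cast at h2 ⊢; omega⟩
      · rintro ⟨j, a', b', c', hget, h1, h2⟩
        cases j with
        | zero =>
          simp at hget
          obtain ⟨rfl, rfl, rfl⟩ := hget
          exact absurd (by push_cast at h2; omega) hmid
        | succ k =>
          exact ⟨k, a', b', c', by simpa using hget, h1, by push_cast at h2 ⊢; omega⟩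
    · rw [ih]
      constructor
      · rintro ⟨j, a', b', c', hget, h1, h2⟩
        exact ⟨j + 1, a', b', c', by simpa using hget, h1, by push_cast at h2 ⊢; omega⟩
      · rintro ⟨j, a', b', c', hget, h1, h2⟩
        cases j with
        | zero =>
          simp at hget
          obtain ⟨rfl, rfl, rfl⟩ := hget
          exact absurd h1 habc
        | succ k =>
          exact ⟨k, a', b', c', by simpa using hget, h1, by push_cast at h2 ⊢; omega⟩

lemma pvTrip_getElem (l : List Char) (j : Nat) (a b c : Char) :
    (l.zip ((l.drop 1).zip (l.drop 2)))[j]? = some (a, b, c) ↔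
      l[j]? = some a ∧ l[j + 1]? = some b ∧ l[j + 2]? = some c := by
  simp [List.getElem?_zip_eq_some, List.getElem?_drop, Nat.add_comm]

lemma pvTripleAbc_iff (l : List Char) (i : Int) :
    pvTripleAbc l i = true ↔
      ∃ a b c : Char, PySem.List.pyGet? l (i - 1) = some a ∧ PySem.List.pyGet? l i = some b ∧
        PySem.List.pyGet? l (i + 1) = some c ∧ String.mk [a, b, c] = "abc" := by
  unfold pvTripleAbc
  rcases h1 : PySem.List.pyGet? l (i - 1) with _ | a <;>
    rcases h2 : PySem.List.pyGet? l i with _ | b <;>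
      rcases h3 : PySem.List.pyGet? l (i + 1) with _ | c <;> simp

lemma pvGet_shift (l : List Char) (j : Nat) (x : Char) (k : Int) (hk : 0 ≤ k) :
    (PySem.List.pyGet? l ((j : Int) + k) = some x) ↔ l[j + k.toNat]? = some x := by
  rw [show ((j : Int) + k) = ((j + k.toNat : Nat) : Int) by omega, PySem.List.pyGet?_natCast]
lemma pvBackward (l : List Char) (i : Int) (h1 : 1 ≤ i) (h2 : i ≤ (l.length : Int) - 2)
    (htr : pvTripleAbc l i = true) :
    ∃ j : Nat, ∃ a b c : Char,
      (l.zip ((l.drop 1).zip (l.drop 2)))[j]? = some (a, b, c) ∧ String.mk [a, b, c] = "abc" ∧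
        (j : Int) + 1 = i := by
  rw [pvTripleAbc_iff] at htr
  obtain ⟨a, b, c, ha, hb, hc, habc⟩ := htr
  refine ⟨(i - 1).toNat, a, b, c, ?_, habc, by omega⟩
  rw [pvTrip_getElem]
  rw [PySem.List.pyGet?_of_nonneg _ (show (0:Int) ≤ i - 1 by omega)] at ha
  rw [PySem.List.pyGet?_of_nonneg _ (show (0:Int) ≤ i by omega)] at hb
  rw [PySem.List.pyGet?_of_nonneg _ (show (0:Int) ≤ i + 1 by omega)] at hc
  rw [show i.toNat = (i - 1).toNat + 1 by omega] at hb
  rw [show (i + 1).toNat = (i - 1).toNat + 2 by omega] at hc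
  exact ⟨ha, hb, hc⟩

lemma pvMain (l : List Char) :
    pvALoop (l.length : Int) (l.zip ((l.drop 1).zip (l.drop 2))) 0 =
      [PySem.Int.floordiv (l.length : Int) 2 - 1, PySem.Int.floordiv (l.length : Int) 2].any
        (fun i => decide (1 ≤ i) && decide (i ≤ (l.length : Int) - 2) &&
          decide ((l.length : Int) - 2 ≤ 2 * i) && decide (2 * i ≤ (l.length : Int)) &&
          pvTripleAbc l i) := by
  rw [Bool.eq_iff_iff, pvALoop_iff]
  have hq : PySem.Int.floordiv ((l.length : Int)) 2 * 2 ≤ (l.length : Int) ∧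
      (l.length : Int) < (PySem.Int.floordiv ((l.length : Int)) 2 + 1) * 2 :=
    (PySem.Int.floordiv_eq_iff_of_pos (by omega)).mp rfl
  simp only [List.any_cons, List.any_nil, Bool.or_false, Bool.or_eq_true, Bool.and_eq_true,
    decide_eq_true_eq]
  constructor
  · rintro ⟨j, a, b, c, hget, habc, hmid⟩
    rw [pvTrip_getElem] at hget
    obtain ⟨ha, hb, hc⟩ := hget
    have hjlen : j + 2 < l.length := by
      rcases List.getElem?_eq_some_iff.mp hc with ⟨h, -⟩; exact h
    -- the qualifying center i = j+1 is n/2-1 or n/2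
    have hcases : ((j : Int) + 1 = PySem.Int.floordiv ((l.length : Int)) 2 - 1) ∨
        ((j : Int) + 1 = PySem.Int.floordiv ((l.length : Int)) 2) := by
      obtain ⟨hq1, hq2⟩ := hq
      obtain ⟨hm1, hm2⟩ := hmid
      generalize PySem.Int.floordiv ((l.length : Int)) 2 = fd at hq1 hq2 ⊢
      omega
    have habc' : pvTripleAbc l ((j : Int) + 1) = true := by
      rw [pvTripleAbc_iff]
      refine ⟨a, b, c, ?_, ?_, ?_, habc⟩
      · rw [show ((j:Int) + 1 - 1) = ((j:Nat):Int) by omega, PySem.List.pyGet?_natCast]; exact ha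
      · rw [pvGet_shift l j b 1 (by omega)]; exact hb
      · rw [show ((j:Int) + 1 + 1) = (j:Int) + 2 by omega, pvGet_shift l j c 2 (by omega)]
        exact hc
    rcases hcases with h | h
    · exact Or.inl ⟨⟨⟨⟨by omega, by omega⟩, by omega⟩, by omega⟩, h ▸ habc'⟩
    · exact Or.inr ⟨⟨⟨⟨by omega, by omega⟩, by omega⟩, by omega⟩, h ▸ habc'⟩
  · rintro (⟨⟨⟨⟨h1, h2⟩, h3⟩, h4⟩, htr⟩ | ⟨⟨⟨⟨h1, h2⟩, h3⟩, h4⟩, htr⟩) <;>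
    · obtain ⟨j, a, b, c, hget, habc, hji⟩ := pvBackward l _ h1 h2 htr
      exact ⟨j, a, b, c, hget, habc, by omega⟩

-- ===== VERDICT (by name: the statement is the Claim_ definition above) =====
theorem is_in_middle_spec : Claim_equal_is_in_middle := by
  intro s _
  unfold Spec_is_in_middle
  show is_in_middle s = is_in_middle_alt s
  simp only [is_in_middle, is_in_middle_alt]
  exact pvMain s.toList
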